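-- pv_equiv track=rewrite | github.com/david4096/sparql-agent | src/sparql_agent/discovery/connectivity.py | _extract_server_info
-- ===== SOURCE A (Python) =====
-- from typing import Optional, Dict, Any, List, Tuple
--
-- def _extract_server_info(headers: Dict[str, str]) -> Dict[str, str]:
--     """Extract server information from headers"""
--     info = {}
--
--     # Common server headers
--     server_headers = ['Server', 'X-Powered-By', 'X-SPARQL-Server']
--     for header in server_headers:
--         if header.lower() in [h.lower() for h in headers.keys()]:
--             actual_key = [h for h in headers.keys() if h.lower() == header.lower()][0]
--             info[header] = headers[actual_key]
--
--     return info
-- ===== SOURCE B (Python) =====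
-- def _extract_server_info(headers):
--     """Extract server information from headers"""
--     # Single forward pass with three accumulator slots: remember the value of the
--     # first key that case-folds to each target, then emit in canonical order.
--     server = powered = sparql = None
--     for key, value in headers.items():
--         lk = key.lower()
--         if server is None and lk == 'server':
--             server = value
--         elif powered is None and lk == 'x-powered-by':
--             powered = value
--         elif sparql is None and lk == 'x-sparql-server':
--             sparql = value
--     info = {}
--     if server is not None:
--         info['Server'] = server
--     if powered is not None:
--         info['X-Powered-By'] = powered
--     if sparql is not None:
--         info['X-SPARQL-Server'] = sparql
--     return info
-- ===== Notes on version B (the rewrite author's own statement) =====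
-- stated objective: alternative
-- what changed: A loops over the 3 target names and scans all header keys three times per target; B makes one forward pass over the headers with three accumulator slots (first match per target wins) and then emits the filled slots in canonical order, never scanning the keys per target.
import Mathlib
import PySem

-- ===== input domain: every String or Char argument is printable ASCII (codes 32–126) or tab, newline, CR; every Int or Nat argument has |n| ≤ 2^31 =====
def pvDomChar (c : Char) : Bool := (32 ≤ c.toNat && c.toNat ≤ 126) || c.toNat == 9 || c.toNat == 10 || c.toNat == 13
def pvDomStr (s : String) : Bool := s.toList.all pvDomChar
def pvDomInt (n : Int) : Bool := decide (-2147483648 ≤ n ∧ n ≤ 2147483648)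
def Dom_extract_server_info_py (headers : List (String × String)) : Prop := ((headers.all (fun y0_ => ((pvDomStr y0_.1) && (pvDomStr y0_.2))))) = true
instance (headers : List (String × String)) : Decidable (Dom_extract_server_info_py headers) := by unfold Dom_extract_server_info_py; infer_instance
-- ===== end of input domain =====

-- B replaces A's per-target scans of all header keys by a single forward pass over the
-- headers with three accumulator slots (first match wins), emitted in canonical order.

-- ===== PORT A =====
-- server_headers = ['Server', 'X-Powered-By', 'X-SPARQL-Server']
def pvServerHeaders : List String := ["Server", "X-Powered-By", "X-SPARQL-Server"]

def extract_server_info_py (headers : List (String × String)) : List (String × String) :=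
  let d : PySem.Dict String String := PySem.Dict.ofList headers   -- the Python argument is a dict
  let info : PySem.Dict String String :=
    pvServerHeaders.foldl (fun info header =>
      if (d.keys.map (fun h => PySem.Str.lower h)).contains (PySem.Str.lower header) then
        -- actual_key = [h for h in headers.keys() if h.lower() == header.lower()][0];
        -- headI is exact here: the guard just above ensures the filtered list is nonempty
        let actual_key := (d.keys.filter (fun h => PySem.Str.lower h == PySem.Str.lower header)).headI
        info.insert header (d.getD actual_key "")   -- headers[actual_key]; the key is present
      else info) PySem.Dict.empty
  info.items

-- ===== PORT B =====
-- one loop iteration of B: three slots server / powered / sparql, each keeps its FIRST match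
def pvSlotStep (s : Option String × Option String × Option String) (kv : String × String) :
    Option String × Option String × Option String :=
  let lk := PySem.Str.lower kv.1
  if s.1.isNone && (lk == "server") then (some kv.2, s.2.1, s.2.2)
  else if s.2.1.isNone && (lk == "x-powered-by") then (s.1, some kv.2, s.2.2)
  else if s.2.2.isNone && (lk == "x-sparql-server") then (s.1, s.2.1, some kv.2)
  else s

def extract_server_info_py_alt (headers : List (String × String)) : List (String × String) :=
  let d : PySem.Dict String String := PySem.Dict.ofList headers
  let slots : Option String × Option String × Option String :=
    d.items.foldl pvSlotStep (none, none, none)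
  let info0 : PySem.Dict String String := PySem.Dict.empty
  let info1 := match slots.1 with | some v => info0.insert "Server" v | none => info0
  let info2 := match slots.2.1 with | some v => info1.insert "X-Powered-By" v | none => info1
  let info3 := match slots.2.2 with | some v => info2.insert "X-SPARQL-Server" v | none => info2
  info3.items

-- ===== PRECONDITION & SPEC =====
def Spec_extract_server_info_py (headers : List (String × String)) (out : List (String × String)) : Prop := out = extract_server_info_py_alt headers
instance (headers : List (String × String)) (out : List (String × String)) : Decidable (Spec_extract_server_info_py headers out) := by unfold Spec_extract_server_info_py; infer_instance

-- ===== CLAIM =====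
def Claim_equal_extract_server_info_py : Prop := ∀ (headers : List (String × String)), Dom_extract_server_info_py headers → Spec_extract_server_info_py headers (extract_server_info_py headers)

-- ===== LEMMAS AND PROOFS =====

-- B's pass: the slot fold over L fills each slot with the value of the FIRST pair of L whose
-- lowercased key is the slot's target (a filled slot is never overwritten)
theorem pv_slots_eq (L : List (String × String)) (a b c : Option String) :
    L.foldl pvSlotStep (a, b, c)
    = (a.or ((L.find? (fun p => PySem.Str.lower p.1 == "server")).map (·.2)),
       b.or ((L.find? (fun p => PySem.Str.lower p.1 == "x-powered-by")).map (·.2)),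
       c.or ((L.find? (fun p => PySem.Str.lower p.1 == "x-sparql-server")).map (·.2))) := by
  induction L generalizing a b c with
  | nil => simp
  | cons p L ih =>
    rw [List.foldl_cons]
    by_cases h1 : PySem.Str.lower p.1 = "server"
    · cases a with
      | none =>
        rw [show pvSlotStep (none, b, c) p = (some p.2, b, c) from by simp [pvSlotStep, h1], ih]
        simp [h1]
      | some v =>
        rw [show pvSlotStep (some v, b, c) p = (some v, b, c) from by simp [pvSlotStep, h1], ih]
        simp [h1]
    · by_cases h2 : PySem.Str.lower p.1 = "x-powered-by"
      · cases b with
        | none =>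
          rw [show pvSlotStep (a, none, c) p = (a, some p.2, c) from by simp [pvSlotStep, h2], ih]
          simp [h2]
        | some v =>
          rw [show pvSlotStep (a, some v, c) p = (a, some v, c) from by simp [pvSlotStep, h2], ih]
          simp [h2]
      · by_cases h3 : PySem.Str.lower p.1 = "x-sparql-server"
        · cases c with
          | none =>
            rw [show pvSlotStep (a, b, none) p = (a, b, some p.2) from by
                simp [pvSlotStep, h3], ih]
            simp [h3]
          | some v =>
            rw [show pvSlotStep (a, b, some v) p = (a, b, some v) from by
                simp [pvSlotStep, h3], ih]
            simp [h3]
        · rw [show pvSlotStep (a, b, c) p = (a, b, c) from by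
              cases a <;> cases b <;> cases c <;> simp [pvSlotStep, h1, h2, h3], ih]
          simp [h1, h2, h3]

-- A's three scans for one target: when some item of d case-folds to t, the chosen actual_key
-- is the first such item's key, and the dict lookup returns that item's value
theorem pv_a_step (d : PySem.Dict String String) (t : String) (hnd : d.keys.Nodup)
    (p : String × String)
    (hf : d.items.find? (fun q => PySem.Str.lower q.1 == t) = some p) :
    (d.keys.map (fun h => PySem.Str.lower h)).contains t = true
    ∧ (d.keys.filter (fun h => PySem.Str.lower h == t)).headI = p.1
    ∧ d.getD ((d.keys.filter (fun h => PySem.Str.lower h == t)).headI) "" = p.2 := by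
  have hmem : p ∈ d.items := List.mem_of_find?_eq_some hf
  have hpt : PySem.Str.lower p.1 = t := by
    have := List.find?_some hf; simpa using this
  have hkeys : d.keys = d.items.map Prod.fst := rfl
  have hfilter : d.keys.filter (fun h => PySem.Str.lower h == t)
      = (d.items.filter (fun q => PySem.Str.lower q.1 == t)).map Prod.fst := by
    rw [hkeys, List.filter_map]; rfl
  have hhead : (d.items.filter (fun q => PySem.Str.lower q.1 == t)).head? = some p := by
    rw [List.head?_filter, hf]
  have hheadI : (d.keys.filter (fun h => PySem.Str.lower h == t)).headI = p.1 := by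
    rw [hfilter]
    cases hfe : (d.items.filter (fun q => PySem.Str.lower q.1 == t)) with
    | nil => rw [hfe] at hhead; simp at hhead
    | cons a l => rw [hfe] at hhead; simp at hhead; simp [hhead]
  refine ⟨?_, hheadI, ?_⟩
  · rw [hkeys, List.map_map]
    have : t ∈ d.items.map (fun q => PySem.Str.lower q.1) :=
      List.mem_map.mpr ⟨p, hmem, hpt⟩
    simpa [List.contains_iff_mem] using this
  · rw [hheadI]
    have : (p.1, p.2) ∈ d.items := hmem
    exact PySem.Dict.getD_of_mem_items d this hnd ""

theorem pv_a_step_none (d : PySem.Dict String String) (t : String)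
    (hf : d.items.find? (fun q => PySem.Str.lower q.1 == t) = none) :
    (d.keys.map (fun h => PySem.Str.lower h)).contains t = false := by
  rw [List.find?_eq_none] at hf
  have hkeys : d.keys = d.items.map Prod.fst := rfl
  rw [hkeys, List.map_map]
  have hno : t ∉ d.items.map (fun q => PySem.Str.lower q.1) := by
    rw [List.mem_map]
    rintro ⟨q, hq, hl⟩
    exact absurd (by simpa using hl) (by simpa using hf q hq)
  simpa [List.contains_iff_mem] using hno

-- One target of A (canonical name k, lowered target t) rewritten as a match on the first matching item
theorem pv_a_if (d : PySem.Dict String String) (hnd : d.keys.Nodup)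
    (info : PySem.Dict String String) (k t : String) :
    (if (d.keys.map (fun h => PySem.Str.lower h)).contains t then
       info.insert k (d.getD ((d.keys.filter (fun h => PySem.Str.lower h == t)).headI) "")
     else info)
    = (match (d.items.find? (fun q => PySem.Str.lower q.1 == t)).map (·.2) with
      | some v => info.insert k v
      | none => info) := by
  cases hf : d.items.find? (fun q => PySem.Str.lower q.1 == t) with
  | none => rw [pv_a_step_none d _ hf]; simp
  | some p =>
    obtain ⟨h1, h2, h3⟩ := pv_a_step d _ hnd p hf
    rw [h1, h3]; simp

-- ===== VERDICT =====
theorem extract_server_info_py_spec : Claim_equal_extract_server_info_py := by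
  intro headers _
  unfold Spec_extract_server_info_py extract_server_info_py extract_server_info_py_alt pvServerHeaders
  have hnd := PySem.Dict.nodup_keys_ofList headers
  simp only [List.foldl_cons, List.foldl_nil]
  have e1 : PySem.Str.lower "Server" = "server" := by decide
  have e2 : PySem.Str.lower "X-Powered-By" = "x-powered-by" := by decide
  have e3 : PySem.Str.lower "X-SPARQL-Server" = "x-sparql-server" := by decide
  rw [e1, e2, e3, pv_slots_eq, pv_a_if _ hnd, pv_a_if _ hnd, pv_a_if _ hnd]
  simp only [Option.none_or]
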